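-- pv_equiv track=rewrite | github.com/matdoz/Entrance-Exam-CS-MSc | Dice.py | exercise1
-- ===== SOURCE A (Python) =====
-- def exercise1(trial):
--     hasSix = False
--     isPair = False
--     pairs = 0
--     for char in trial:
--         # This is the case if a 6 is found and no 6 has been found before it
--         if char == '6' and not isPair:
--             if hasSix:
--                 isPair = True
--             else:
--                 hasSix = True
--         # This is the case where a pair of 6 has been found, but the current char is also a 6
--         elif char == '6' and isPair:
--             isPair = False
--             hasSix = True
--         else:
--             if isPair:
--                 pairs += 1
--             hasSix = False
--             isPair = False
--     # This is the case if the pair has been found at the end of the sequence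
--     if isPair:
--         pairs += 1
--     return pairs
-- ===== SOURCE B (Python) =====
-- def exercise1(trial):
--     run = 0
--     pairs = 0
--     for char in trial:
--         if char == '6':
--             run += 1
--         else:
--             if run >= 2 and run % 2 == 0:
--                 pairs += 1
--             run = 0
--     if run >= 2 and run % 2 == 0:
--         pairs += 1
--     return pairs
-- ===== Notes on version B (the rewrite author's own statement) =====
-- stated objective: simpler
-- what changed: Replaces the two-boolean (hasSix/isPair) state machine with a single run-length counter; a maximal run of '6's counts iff its length is even and at least 2.
import Mathlib
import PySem

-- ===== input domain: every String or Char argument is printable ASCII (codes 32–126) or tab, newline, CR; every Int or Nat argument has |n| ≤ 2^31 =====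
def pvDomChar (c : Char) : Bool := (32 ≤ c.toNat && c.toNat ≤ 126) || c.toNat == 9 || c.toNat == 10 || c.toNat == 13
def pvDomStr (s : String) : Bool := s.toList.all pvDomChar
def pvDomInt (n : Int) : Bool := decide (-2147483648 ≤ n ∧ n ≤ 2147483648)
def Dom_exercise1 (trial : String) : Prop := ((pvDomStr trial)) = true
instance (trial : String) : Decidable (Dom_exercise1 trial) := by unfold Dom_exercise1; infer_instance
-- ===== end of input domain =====

-- B replaces A's two-boolean state machine by a single run-length counter; same value on every string.

-- ===== PORT A =====
-- loop body of A: state (hasSix, isPair, pairs)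
def exercise1_step (st : Bool × Bool × Int) (c : Char) : Bool × Bool × Int :=
  let (hasSix, isPair, pairs) := st
  if c == '6' && !isPair then
    (if hasSix then (hasSix, true, pairs) else (true, isPair, pairs))
  else if c == '6' && isPair then
    (true, false, pairs)
  else
    (false, false, if isPair then pairs + 1 else pairs)

def exercise1 (trial : String) : Int :=
  let st := trial.toList.foldl exercise1_step (false, false, 0)
  if st.2.1 then st.2.2 + 1 else st.2.2

-- ===== PORT B =====
-- loop body of B: state (run, pairs)
def exercise1_alt_step (st : Int × Int) (c : Char) : Int × Int :=
  let (run, pairs) := st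
  if c == '6' then (run + 1, pairs)
  else (0, if 2 ≤ run ∧ run % 2 = 0 then pairs + 1 else pairs)

def exercise1_alt (trial : String) : Int :=
  let st := trial.toList.foldl exercise1_alt_step (0, 0)
  if 2 ≤ st.1 ∧ st.1 % 2 = 0 then st.2 + 1 else st.2

-- ===== PRECONDITION & SPEC =====
def Spec_exercise1 (trial : String) (out : Int) : Prop := out = exercise1_alt trial
instance (trial : String) (out : Int) : Decidable (Spec_exercise1 trial out) := by unfold Spec_exercise1; infer_instance

-- ===== CLAIM (what is proved, stated in full; the proofs are below) =====
def Claim_equal_exercise1 : Prop := ∀ (trial : String), Dom_exercise1 trial → Spec_exercise1 trial (exercise1 trial)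

-- ===== LEMMAS AND PROOFS =====

-- the abstraction map from B's run counter to A's boolean pair
def exAbs (st : Int × Int) : Bool × Bool × Int :=
  (decide (1 ≤ st.1), decide (2 ≤ st.1 ∧ st.1 % 2 = 0), st.2)

theorem exercise1_step_abs (st : Int × Int) (h : 0 ≤ st.1) (c : Char) :
    exercise1_step (exAbs st) c = exAbs (exercise1_alt_step st c) := by
  obtain ⟨run, pairs⟩ := st
  simp only at h
  by_cases hc : c == '6'
  · simp only [exAbs, exercise1_step, exercise1_alt_step, hc]
    by_cases h1 : (1 : Int) ≤ run
    · by_cases h2 : 2 ≤ run ∧ run % 2 = 0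
      · have h3 : ¬(2 ≤ run + 1 ∧ (run + 1) % 2 = 0) := by omega
        have h4 : 1 ≤ run + 1 := by omega
        simp [h1, h2, h4]
        omega
      · have h3 : 2 ≤ run + 1 ∧ (run + 1) % 2 = 0 := by omega
        have h4 : 1 ≤ run + 1 := by omega
        simp [h1, h3, h4]
        omega
    · have hr : run = 0 := by omega
      subst hr
      simp
  · simp only [exAbs, exercise1_step, exercise1_alt_step, hc, Bool.false_and]
    by_cases h2 : 2 ≤ run ∧ run % 2 = 0 <;> simp [h2]

theorem exercise1_foldl_abs (cs : List Char) (st : Int × Int) (h : 0 ≤ st.1) :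
    cs.foldl exercise1_step (exAbs st) = exAbs (cs.foldl exercise1_alt_step st) ∧
      0 ≤ (cs.foldl exercise1_alt_step st).1 := by
  induction cs generalizing st with
  | nil => exact ⟨rfl, h⟩
  | cons c cs ih =>
    have hstep := exercise1_step_abs st h c
    have hpos : 0 ≤ (exercise1_alt_step st c).1 := by
      obtain ⟨run, pairs⟩ := st
      simp only [exercise1_alt_step]
      by_cases hc : c == '6' <;> simp [hc] <;> omega
    simpa only [List.foldl_cons, hstep] using ih (exercise1_alt_step st c) hpos

-- ===== VERDICT (by name: the statement is the Claim_ definition above) =====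
theorem exercise1_spec : Claim_equal_exercise1 := by
  intro trial _
  unfold Spec_exercise1 exercise1 exercise1_alt
  have h := exercise1_foldl_abs trial.toList (0, 0) (by norm_num)
  rw [show ((false, false, (0:Int)) : Bool × Bool × Int) = exAbs (0, 0) by simp [exAbs], h.1]
  obtain ⟨run, pairs⟩ := trial.toList.foldl exercise1_alt_step (0, 0)
  simp only [exAbs]
  by_cases h2 : 2 ≤ run ∧ run % 2 = 0 <;> simp [h2]
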